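-- pv_equiv track=rewrite | github.com/youhaowang-dev/algorithm | P1/GroupAnagrams.py | get_hash_lower_case_english_char_only
-- ===== SOURCE A (Python) =====
-- def get_hash_lower_case_english_char_only(word: str) -> str:
--     letters = list(word)
--     letter_to_count = dict()
--     for letter in letters:
--         letter_to_count[letter] = 1 + letter_to_count.get(letter, 0)
--
--     hash = list()
--     for letter in "abcdefghijklmnopqrstuvwxyz":
--         hash.append(letter)
--         count = letter_to_count.get(letter, 0)
--         hash.append(str(count))
--
--     return "".join(hash)
-- ===== SOURCE B (Python) =====
-- def get_hash_lower_case_english_char_only(word: str) -> str: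
--     # Sort the lowercase letters of the word, then sweep the sorted list once
--     # with a cursor, consuming each letter's run as the alphabet advances.
--     rest = sorted(c for c in word if 'a' <= c <= 'z')
--     parts = []
--     for letter in "abcdefghijklmnopqrstuvwxyz":
--         n = 0
--         while n < len(rest) and rest[n] == letter:
--             n += 1
--         parts.append(letter + str(n))
--         rest = rest[n:]
--     return "".join(parts)
-- ===== Notes on version B (the rewrite author's own statement) =====
-- stated objective: alternative
-- what changed: B replaces A's build-a-frequency-dict-then-lookup with sort-then-sweep: it sorts the word's lowercase letters and walks the sorted list once with a cursor, consuming each letter's run as the alphabet advances.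
import Mathlib
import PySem

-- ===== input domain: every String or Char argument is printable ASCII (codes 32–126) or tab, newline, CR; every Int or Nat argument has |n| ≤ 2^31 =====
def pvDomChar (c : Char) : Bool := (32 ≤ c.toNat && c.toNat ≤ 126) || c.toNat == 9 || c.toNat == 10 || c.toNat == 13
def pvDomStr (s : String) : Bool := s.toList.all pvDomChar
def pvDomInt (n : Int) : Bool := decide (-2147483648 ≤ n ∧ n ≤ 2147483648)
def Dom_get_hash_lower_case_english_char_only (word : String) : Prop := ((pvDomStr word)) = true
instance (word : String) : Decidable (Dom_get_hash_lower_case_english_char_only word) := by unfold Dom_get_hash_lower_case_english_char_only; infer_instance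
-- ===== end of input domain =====

-- B replaces A's frequency dictionary with sort-then-sweep: sort the lowercase letters, then
-- consume each letter's run with a cursor as the alphabet advances (alternative algorithm, same result).
-- the literal "abcdefghijklmnopqrstuvwxyz" both Pythons iterate over, as a char list
def pvAlphabet : List Char :=
  ['a','b','c','d','e','f','g','h','i','j','k','l','m','n','o','p','q','r','s','t','u','v','w','x','y','z']

-- ===== PORT A =====
def get_hash_lower_case_english_char_only (word : String) : String :=
  let letters := word.toList
  let letter_to_count :=
    letters.foldl (fun d l => d.insert l (1 + d.getD l 0)) (PySem.Dict.empty (κ := Char) (ν := Int))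
  let hash :=
    pvAlphabet.foldl
      (fun h l => (h ++ [String.ofList [l]]) ++ [PySem.Int.toStr (letter_to_count.getD l 0)])
      ([] : List String)
  PySem.Str.join "" hash

-- ===== PORT B =====
-- the inner `while n < len(rest) and rest[n] == letter: n += 1` — the length of the leading run
def pvRun (c : Char) : List Char → Nat
  | [] => 0
  | x :: xs => if x = c then pvRun c xs + 1 else 0

def get_hash_lower_case_english_char_only_alt (word : String) : String :=
  let rest0 := PySem.List.sorted (word.toList.filter (fun c => 'a' ≤ c && c ≤ 'z')) (fun x => x) false
  let res :=
    pvAlphabet.foldl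
      (fun (st : List Char × List String) letter =>
        let n := pvRun letter st.1
        -- rest = rest[n:]  (n is a nonnegative in-range index, so the slice is List.drop)
        (st.1.drop n, st.2 ++ [String.ofList (letter :: PySem.Int.toChars (n : Int))]))
      (rest0, ([] : List String))
  PySem.Str.join "" res.2

-- ===== PRECONDITION & SPEC =====
def Spec_get_hash_lower_case_english_char_only (word : String) (out : String) : Prop := out = get_hash_lower_case_english_char_only_alt word
instance (word : String) (out : String) : Decidable (Spec_get_hash_lower_case_english_char_only word out) := by unfold Spec_get_hash_lower_case_english_char_only; infer_instance

-- ===== CLAIM (what is proved, stated in full; the proofs are below) =====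
def Claim_equal_get_hash_lower_case_english_char_only : Prop := ∀ (word : String), Dom_get_hash_lower_case_english_char_only word → Spec_get_hash_lower_case_english_char_only word (get_hash_lower_case_english_char_only word)

-- ===== LEMMAS AND PROOFS =====
-- A's dictionary lookup after the counting loop is the char count of the word
theorem pvCntA (w : List Char) (c : Char) :
    (w.foldl (fun d l => d.insert l (1 + d.getD l 0))
      (PySem.Dict.empty (κ := Char) (ν := Int))).getD c 0 = (w.count c : Int) := by
  have h : (fun (d : PySem.Dict Char Int) l => d.insert l (1 + d.getD l 0))
      = (fun d l => d.insert l (d.getD l 0 + 1)) := by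
    funext d l; rw [Int.add_comm]
  rw [h, PySem.Dict.getD_foldl_insert_add_one, PySem.Dict.getD_empty]
  simp

-- on a sorted list whose elements are all ≥ c, the leading run of c has length count c,
-- and dropping it leaves exactly the elements > c
theorem pvRunSpec (l : List Char) (c : Char) (hs : l.Pairwise (· ≤ ·)) (hge : ∀ x ∈ l, c ≤ x) :
    pvRun c l = l.count c ∧ l.drop (pvRun c l) = l.filter (fun x => decide (c < x)) := by
  induction l with
  | nil => simp [pvRun]
  | cons x xs ih =>
    rcases List.pairwise_cons.mp hs with ⟨hx, hxs⟩
    by_cases hc : x = c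
    · subst hc
      obtain ⟨h1, h2⟩ := ih hxs (fun y hy => hx y hy)
      refine ⟨by simp [pvRun, h1], ?_⟩
      simpa [pvRun, lt_irrefl] using h2
    · have hlt : c < x := lt_of_le_of_ne (hge x (by simp)) (fun h => hc h.symm)
      have hall : ∀ y ∈ x :: xs, c < y := by
        intro y hy
        rcases List.mem_cons.mp hy with rfl | hy'
        · exact hlt
        · exact lt_of_lt_of_le hlt (hx y hy')
      constructor
      · simp only [pvRun, if_neg hc]
        symm
        simp only [List.count_eq_zero]
        intro hmem
        exact absurd rfl (ne_of_gt (hall c hmem))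
      · simp only [pvRun, if_neg hc, List.drop_zero]
        symm
        exact List.filter_eq_self.mpr (fun y hy => decide_eq_true (hall y hy))

-- the alphabet sweep: starting from the elements of s0 that lie in the (strictly increasing)
-- remaining letters cs, each step records s0's count of its letter
theorem pvFoldB (cs : List Char) (s0 : List Char) (acc : List String)
    (hcs : cs.Pairwise (· < ·)) (hs : s0.Pairwise (· ≤ ·)) :
    (cs.foldl
      (fun (st : List Char × List String) letter =>
        let n := pvRun letter st.1
        (st.1.drop n, st.2 ++ [String.ofList (letter :: PySem.Int.toChars (n : Int))]))
      (s0.filter (fun x => decide (x ∈ cs)), acc)).2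
    = acc ++ cs.map (fun c => String.ofList (c :: PySem.Int.toChars (s0.count c : Int))) := by
  induction cs generalizing acc with
  | nil => simp
  | cons c cs' ih =>
    rcases List.pairwise_cons.mp hcs with ⟨hc, hcs'⟩
    set rest := s0.filter (fun x => decide (x ∈ c :: cs')) with hrest
    have hrs : rest.Pairwise (· ≤ ·) := hs.filter _
    have hge : ∀ x ∈ rest, c ≤ x := by
      intro x hx
      have hmem : x ∈ c :: cs' := by
        have := List.of_mem_filter hx
        exact of_decide_eq_true this
      rcases List.mem_cons.mp hmem with rfl | h'
      · exact le_refl x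
      · exact le_of_lt (hc x h')
    obtain ⟨hcount, hdrop⟩ := pvRunSpec rest c hrs hge
    have hcnt : rest.count c = s0.count c := by
      rw [hrest, List.count_filter]
      simp
    have hnext : rest.filter (fun x => decide (c < x)) = s0.filter (fun x => decide (x ∈ cs')) := by
      rw [hrest, List.filter_filter]
      apply List.filter_congr
      intro x _
      by_cases hx : x ∈ cs'
      · have : c < x := hc x hx
        simp [hx, List.mem_cons, this]
      · simp only [List.mem_cons]
        by_cases hxc : x = c
        · subst hxc; simp [hx]
        · simp [hx, hxc]
    simp only [List.foldl_cons, List.map_cons]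
    rw [hdrop, hnext, hcount, hcnt]
    rw [ih _ hcs']
    simp

-- every char the filter of Source B keeps is one of the 26 alphabet letters
theorem pvMemAlphabet (x : Char) (h : ('a' ≤ x && x ≤ 'z') = true) : x ∈ pvAlphabet := by
  simp only [Bool.and_eq_true, decide_eq_true_eq] at h
  have h1 : 97 ≤ x.toNat := h.1
  have h2 : x.toNat ≤ 122 := h.2
  have hval : x = Char.ofNat x.toNat := by
    simp [Char.ofNat_toNat]
  interval_cases h' : x.toNat <;> simp_all [pvAlphabet, Char.ext_iff]

-- B's output is the canonical letter-count concatenation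
theorem pvBcanon (word : String) :
    get_hash_lower_case_english_char_only_alt word
    = PySem.Str.join ""
        (pvAlphabet.map (fun c => String.ofList (c :: PySem.Int.toChars (word.toList.count c : Int)))) := by
  unfold get_hash_lower_case_english_char_only_alt
  set s0 := PySem.List.sorted (word.toList.filter (fun c => 'a' ≤ c && c ≤ 'z')) (fun x => x) false with hs0
  have hsp : s0.Pairwise (· ≤ ·) := by
    have := PySem.List.sorted_pairwise (word.toList.filter (fun c => 'a' ≤ c && c ≤ 'z')) (fun x => x)
    simpa using this
  have hself : s0.filter (fun x => decide (x ∈ pvAlphabet)) = s0 := by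
    apply List.filter_eq_self.mpr
    intro x hx
    have hx' : x ∈ word.toList.filter (fun c => 'a' ≤ c && c ≤ 'z') := by
      simpa [hs0, PySem.List.mem_sorted] using hx
    exact decide_eq_true (pvMemAlphabet x (List.mem_filter.mp hx').2)
  have hcnt : ∀ c ∈ pvAlphabet, s0.count c = word.toList.count c := by
    intro c hcmem
    have hperm : s0.Perm (word.toList.filter (fun c => 'a' ≤ c && c ≤ 'z')) :=
      PySem.List.sorted_perm _ _ _
    rw [hperm.count_eq, List.count_filter]
    have : ('a' ≤ c && c ≤ 'z') = true := by
      fin_cases hcmem <;> decide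
    simp [this]
  have hmap : pvAlphabet.map (fun c => String.ofList (c :: PySem.Int.toChars (s0.count c : Int)))
      = pvAlphabet.map (fun c => String.ofList (c :: PySem.Int.toChars (word.toList.count c : Int))) :=
    List.map_congr_left (fun c hc => by rw [hcnt c hc])
  rw [← hmap]
  have hfold := pvFoldB pvAlphabet s0 [] (by decide) hsp
  rw [hself] at hfold
  simpa using congrArg (PySem.Str.join "") hfold

-- ===== VERDICT (by name: the statement is the Claim_ definition above) =====
theorem get_hash_lower_case_english_char_only_spec : Claim_equal_get_hash_lower_case_english_char_only := by
  intro word _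
  unfold Spec_get_hash_lower_case_english_char_only
  rw [pvBcanon]
  unfold get_hash_lower_case_english_char_only
  simp only [pvAlphabet, List.foldl, List.map, pvCntA, List.nil_append,
    List.cons_append, List.append_assoc]
  simp only [PySem.Str.join, PySem.Chars.join, PySem.Int.toStr, List.intercalate]
  rw [← String.toList_inj]
  simp
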